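-- pv_equiv track=rewrite | github.com/sisyga/biolgca | analysis.py | ind_coord
-- ===== SOURCE A (Python) =====
-- def ind_coord(ind_array, coord_array, ind):
--     indexlist = []
--     for j in ind:
--         for counter, i in enumerate(ind_array):
--            if i == j:
--                index = counter
--                indexlist.append(index)
--     return coord_array[indexlist[0]]
-- ===== SOURCE B (Python) =====
-- def ind_coord(ind_array, coord_array, ind):
--     first = {}
--     for i, v in enumerate(ind_array):
--         if v not in first:
--             first[v] = i
--     for j in ind:
--         if j in first:
--             return coord_array[first[j]]
--     raise IndexError("no element of ind occurs in ind_array")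
-- ===== Notes on version B (the rewrite author's own statement) =====
-- stated objective: faster
-- what changed: Replaced the full nested scan (every j in ind against every element of ind_array, collecting all matches) by a single pass building a first-occurrence hash map over ind_array and an early-returning lookup loop over ind.
import Mathlib
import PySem

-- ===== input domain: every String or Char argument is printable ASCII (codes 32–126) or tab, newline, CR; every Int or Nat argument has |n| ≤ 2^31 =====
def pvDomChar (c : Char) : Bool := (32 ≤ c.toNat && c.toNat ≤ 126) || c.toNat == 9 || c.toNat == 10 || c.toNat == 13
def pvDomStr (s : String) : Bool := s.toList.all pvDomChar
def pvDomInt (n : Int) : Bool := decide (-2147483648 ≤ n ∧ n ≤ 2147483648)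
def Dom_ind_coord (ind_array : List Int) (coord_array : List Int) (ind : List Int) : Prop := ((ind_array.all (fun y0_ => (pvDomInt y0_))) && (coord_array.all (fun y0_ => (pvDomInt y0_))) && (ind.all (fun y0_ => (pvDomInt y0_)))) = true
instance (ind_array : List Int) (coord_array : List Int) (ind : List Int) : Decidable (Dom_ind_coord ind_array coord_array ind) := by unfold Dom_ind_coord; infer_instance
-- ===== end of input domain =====

-- B replaces A's full nested scan by a single-pass first-occurrence dictionary over ind_array
-- and an early-returning lookup loop over ind (objective: faster, asymptotic).


-- ===== PORT A =====
-- literal port of A: build indexlist by the nested loops, then coord_array[indexlist[0]]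
-- (where the Python raises IndexError the pyGet? chain is none; `.getD 0` totalizes outside Pre_)
def ind_coord (ind_array : List Int) (coord_array : List Int) (ind : List Int) : Int :=
  let indexlist : List Int :=
    ind.foldl (fun acc j =>
      (PySem.List.enumerate ind_array 0).foldl
        (fun acc2 ci => if ci.2 == j then acc2 ++ [ci.1] else acc2) acc) []
  ((PySem.List.pyGet? indexlist 0).bind (fun i => PySem.List.pyGet? coord_array i)).getD 0

-- ===== PORT B =====
-- first-occurrence dictionary of Source B's first loop
def pvFirstDict (ind_array : List Int) : PySem.Dict Int Int :=
  (PySem.List.enumerate ind_array 0).foldl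
    (fun d p => if d.contains p.2 then d else d.insert p.2 p.1) PySem.Dict.empty

-- Source B's second loop: first j found in the dict returns coord_array[first[j]]; none = the raise
def pvLookupLoop (d : PySem.Dict Int Int) (coord_array : List Int) : List Int → Option Int
  | [] => none
  | j :: rest =>
    match PySem.Dict.get? d j with
    | some i => PySem.List.pyGet? coord_array i
    | none => pvLookupLoop d coord_array rest

def ind_coord_alt (ind_array : List Int) (coord_array : List Int) (ind : List Int) : Int :=
  (pvLookupLoop (pvFirstDict ind_array) coord_array ind).getD 0

-- ===== PRECONDITION & SPEC =====
-- Pre_ excludes exactly the inputs where the Python A raises IndexError: no element of ind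
-- occurs in ind_array (indexlist[0] fails), or the first matching index is ≥ len(coord_array).
def Pre_ind_coord (ind_array : List Int) (coord_array : List Int) (ind : List Int) : Prop :=
  (ind.find? (fun j => ind_array.contains j)).isSome ∧
  ind_array.idxOf ((ind.find? (fun j => ind_array.contains j)).getD 0) < coord_array.length

instance (ind_array : List Int) (coord_array : List Int) (ind : List Int) : Decidable (Pre_ind_coord ind_array coord_array ind) := by unfold Pre_ind_coord; infer_instance

def pvWitness_ind_coord : List Int × List Int × List Int := ([5, 7, 9], [10, 20, 30], [7, 5])

def Spec_ind_coord (ind_array : List Int) (coord_array : List Int) (ind : List Int) (out : Int) : Prop := out = ind_coord_alt ind_array coord_array ind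
instance (ind_array : List Int) (coord_array : List Int) (ind : List Int) (out : Int) : Decidable (Spec_ind_coord ind_array coord_array ind out) := by unfold Spec_ind_coord; infer_instance

-- ===== CLAIM (what is proved, stated in full; the proofs are below) =====
def Claim_equal_ind_coord : Prop := ∀ (ind_array : List Int) (coord_array : List Int) (ind : List Int), Dom_ind_coord ind_array coord_array ind → Pre_ind_coord ind_array coord_array ind → Spec_ind_coord ind_array coord_array ind (ind_coord ind_array coord_array ind)

-- ===== LEMMAS AND PROOFS =====

-- the indices (offset s) of occurrences of j in ind_array, as A's inner loop collects them
def pvMatchIdx (ind_array : List Int) (s : Int) (j : Int) : List Int :=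
  ((PySem.List.enumerate ind_array s).filter (fun p => p.2 == j)).map (·.1)

theorem pvMatchIdx_cons (x : Int) (t : List Int) (s j : Int) :
    pvMatchIdx (x :: t) s j =
      (if x == j then [s] else []) ++ pvMatchIdx t (s + 1) j := by
  simp only [pvMatchIdx, PySem.List.enumerate_cons, List.filter_cons]
  by_cases h : x = j <;> simp [h]

theorem pvMatchIdx_eq_nil_iff (ind_array : List Int) (s j : Int) :
    pvMatchIdx ind_array s j = [] ↔ j ∉ ind_array := by
  induction ind_array generalizing s with
  | nil => simp [pvMatchIdx]
  | cons x t ih =>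
    rw [pvMatchIdx_cons]
    by_cases h : x = j
    · simp [h]
    · simp [h, ih, Ne.symm h]

theorem pvMatchIdx_head (ind_array : List Int) (s j : Int) (h : j ∈ ind_array) :
    (pvMatchIdx ind_array s j).head? = some (s + (ind_array.idxOf j : Int)) := by
  induction ind_array generalizing s with
  | nil => simp at h
  | cons x t ih =>
    rw [pvMatchIdx_cons]
    by_cases hx : x = j
    · simp [hx, List.idxOf_cons_self]
    · have hj : j ∈ t := by
        rcases List.mem_cons.mp h with h' | h'
        · exact absurd h'.symm hx
        · exact h'
      have hidx : (x :: t).idxOf j = t.idxOf j + 1 := by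
        simp [hx]
      rw [if_neg (by simpa using hx), List.nil_append, ih (s + 1) hj, hidx]
      push_cast
      ring_nf

-- A's indexlist is the flatMap of the per-j match lists
theorem pvIndexlist_eq (ind_array ind : List Int) :
    ind.foldl (fun acc j =>
      (PySem.List.enumerate ind_array 0).foldl
        (fun acc2 ci => if ci.2 == j then acc2 ++ [ci.1] else acc2) acc) []
    = ind.flatMap (fun j => pvMatchIdx ind_array 0 j) := by
  have h1 : ∀ (acc : List Int), ∀ j ∈ ind,
      (PySem.List.enumerate ind_array 0).foldl
        (fun acc2 ci => if ci.2 == j then acc2 ++ [ci.1] else acc2) acc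
      = acc ++ pvMatchIdx ind_array 0 j := by
    intro acc j _
    exact PySem.List.foldl_append_if (fun (p : Int × Int) => p.2 == j) (fun p => p.1) _ _
  rw [PySem.List.foldl_congr_mem _ _
        (fun acc j => acc ++ pvMatchIdx ind_array 0 j) _ h1,
      PySem.List.foldl_append_eq_flatMap]
  simp

-- head of the flatMap = first match of the first j of ind found in ind_array
theorem pvFlatMap_head (ind_array ind : List Int) :
    (ind.flatMap (fun j => pvMatchIdx ind_array 0 j)).head? =
      (ind.find? (fun j => ind_array.contains j)).bind
        (fun j => some (ind_array.idxOf j : Int)) := by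
  induction ind with
  | nil => simp
  | cons j rest ih =>
    by_cases h : j ∈ ind_array
    · have hne := (not_iff_not.mpr (pvMatchIdx_eq_nil_iff ind_array 0 j)).mpr (not_not.mpr h)
      have hh := pvMatchIdx_head ind_array 0 j h
      rw [List.flatMap_cons, List.find?_cons_of_pos (by simpa using h)]
      cases hm : pvMatchIdx ind_array 0 j with
      | nil => exact absurd hm hne
      | cons a t =>
        simp [hm] at hh ⊢
        omega
    · have hnil := (pvMatchIdx_eq_nil_iff ind_array 0 j).mpr h
      rw [List.flatMap_cons, hnil, List.find?_cons_of_neg (by simpa using h)]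
      simpa using ih

-- the first-occurrence dict looks up to the first index (offset s), over any starting dict
theorem pvFirstDict_get? (ind_array : List Int) (s : Int) (d : PySem.Dict Int Int) (j : Int) :
    ((PySem.List.enumerate ind_array s).foldl
        (fun d p => if d.contains p.2 then d else d.insert p.2 p.1) d).get? j
    = match d.get? j with
      | some v => some v
      | none => if j ∈ ind_array then some (s + (ind_array.idxOf j : Int)) else none := by
  induction ind_array generalizing s d with
  | nil => cases h : d.get? j <;> simp [h]
  | cons x t ih =>
    rw [PySem.List.enumerate_cons, List.foldl_cons]
    by_cases hc : d.contains x
    · -- x already present: d unchanged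
      rw [if_pos hc, ih]
      cases hd : d.get? j with
      | some v => simp
      | none =>
        have hxj : ¬ x = j := by
          intro he; subst he
          rw [PySem.Dict.contains_eq_isSome_get?, hd] at hc; simp at hc
        have hidx : (x :: t).idxOf j = t.idxOf j + 1 := by
          simp [hxj]
        by_cases hj : j ∈ t
        · have hm : j ∈ x :: t := List.mem_cons_of_mem _ hj
          simp only [hj, if_pos, hm, hidx]
          push_cast; ring_nf
        · have hm : j ∉ x :: t := by
            intro hmem; rcases List.mem_cons.mp hmem with h' | h'
            · exact hxj h'.symm
            · exact hj h'
          simp [hj, hm]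
    · rw [if_neg hc, ih]
      by_cases hxj : j = x
      · subst hxj
        have hd : d.get? j = none := by
          rw [PySem.Dict.contains_eq_isSome_get?] at hc
          cases h : d.get? j <;> simp [h] at hc ⊢
        rw [PySem.Dict.get?_insert_self, hd]
        simp [List.idxOf_cons_self]
      · rw [PySem.Dict.get?_insert_of_ne _ _ hxj]
        cases hd : d.get? j with
        | some v => simp
        | none =>
          have hidx : (x :: t).idxOf j = t.idxOf j + 1 := by
            simp [List.idxOf_cons, beq_eq_false_iff_ne.mpr (Ne.symm hxj)]
          by_cases hj : j ∈ t
          · have hm : j ∈ x :: t := List.mem_cons_of_mem _ hj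
            simp only [hj, if_pos, hm, hidx]
            push_cast; ring_nf
          · have hm : j ∉ x :: t := by
              intro hmem; rcases List.mem_cons.mp hmem with h' | h'
              · exact hxj h'
              · exact hj h'
            simp [hj, hm]

theorem pvFirstDict_get?' (ind_array : List Int) (j : Int) :
    (pvFirstDict ind_array).get? j
    = if j ∈ ind_array then some ((ind_array.idxOf j : Int)) else none := by
  unfold pvFirstDict
  rw [pvFirstDict_get?]
  simp [PySem.Dict.get?_empty]

-- B's lookup loop in terms of find?
theorem pvLookupLoop_eq (ind_array coord_array ind : List Int) :
    pvLookupLoop (pvFirstDict ind_array) coord_array ind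
    = (ind.find? (fun j => ind_array.contains j)).bind
        (fun j => PySem.List.pyGet? coord_array (ind_array.idxOf j : Int)) := by
  induction ind with
  | nil => simp [pvLookupLoop]
  | cons j rest ih =>
    rw [pvLookupLoop, pvFirstDict_get?']
    by_cases h : j ∈ ind_array
    · rw [List.find?_cons_of_pos (by simpa using h)]
      simp [h]
    · rw [List.find?_cons_of_neg (by simpa using h)]
      simp [h, ih]

-- both ports are equal on ALL inputs (the totalizing default coincides outside Pre_ too)
theorem pv_main (ind_array coord_array ind : List Int) :
    ind_coord ind_array coord_array ind = ind_coord_alt ind_array coord_array ind := by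
  have hhead : ∀ (l : List Int), PySem.List.pyGet? l 0 = l.head? := by
    intro l; cases l <;> simp [PySem.List.pyGet?, PySem.List.pyIdx?]
  simp only [ind_coord, ind_coord_alt]
  rw [pvIndexlist_eq, pvLookupLoop_eq, hhead, pvFlatMap_head]
  cases h : ind.find? (fun j => ind_array.contains j) <;> simp

-- ===== VERDICT (by name: the statement is the Claim_ definition above) =====
theorem ind_coord_spec : Claim_equal_ind_coord := by
  intro ia ca ind _ _
  unfold Spec_ind_coord
  exact pv_main ia ca ind
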